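-- pv_equiv track=rewrite | github.com/CeON/chrum | src/for_curious/wf_trans/node_transformations/2forkmergeNode.py | addmine
-- ===== SOURCE A (Python) =====
-- def addmine(vals,upper,lev):
-- 	if lev+1==len(vals):
-- 		retval = []
-- 		for val in vals[lev].split(' '):
-- 			retval.append((val,))
-- 		return retval
-- 	retval = []
-- 	for i in vals[lev].split(' '):
-- 		rets = addmine(vals,upper,lev+1)
-- 		for ret in rets:
-- 			tup = ret+(i,)
-- 			retval.append(tup)
-- 	return retval
-- ===== SOURCE B (Python) =====
-- def addmine(vals, upper, lev):
--     # Single ascending pass: seed with the tuples for level lev, then for each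
--     # deeper level prepend its tokens; each suffix product is built exactly once
--     # (A's recursion recomputes the whole deeper product once per token).
--     acc = [(tok,) for tok in vals[lev].split(' ')]
--     for i in range(lev + 1, len(vals)):
--         acc = [(tok,) + t for t in acc for tok in vals[i].split(' ')]
--     return acc
-- ===== Notes on version B (the rewrite author's own statement) =====
-- stated objective: alternative
-- what changed: Replaces A's recursion (which recomputes the whole deeper Cartesian product once per token of the current level) with a single ascending loop that seeds from vals[lev] and prepends each deeper level's tokens, building every suffix product exactly once.
import Mathlib
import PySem

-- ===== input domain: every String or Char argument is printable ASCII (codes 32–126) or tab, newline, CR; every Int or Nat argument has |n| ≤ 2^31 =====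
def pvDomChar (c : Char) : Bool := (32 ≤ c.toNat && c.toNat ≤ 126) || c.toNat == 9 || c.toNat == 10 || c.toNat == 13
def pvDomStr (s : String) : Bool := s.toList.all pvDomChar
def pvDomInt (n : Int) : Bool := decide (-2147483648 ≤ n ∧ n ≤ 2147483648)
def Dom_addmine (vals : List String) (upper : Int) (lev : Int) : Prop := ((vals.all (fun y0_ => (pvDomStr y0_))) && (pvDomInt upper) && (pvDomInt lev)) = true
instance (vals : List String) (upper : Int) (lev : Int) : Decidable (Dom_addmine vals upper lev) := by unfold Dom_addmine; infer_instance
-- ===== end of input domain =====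

-- B replaces A's recursion (which recomputes the whole deeper product once per token of the
-- current level) by one ascending loop that builds each suffix product exactly once.

-- ===== PORT A =====
-- literal port of A's recursion; fuel bounds the recursion depth (Python has no fuel: on Pre_ the
-- fuel 2*len+1 is never exhausted, as proved below)
def addmineGo (vals : List String) (upper : Int) (lev : Int) : Nat → List (List String)
  | 0 => []
  | fuel + 1 =>
    match PySem.List.pyGet? vals lev with
    | none => []      -- IndexError: unreachable under Pre_
    | some s =>
      let toks := (PySem.Str.split? s " ").getD []    -- sep " " ≠ "": split? is always some
      if lev + 1 = (vals.length : Int) then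
        toks.foldl (fun retval val => retval ++ [[val]]) []
      else
        toks.foldl (fun retval i =>
          let rets := addmineGo vals upper (lev + 1) fuel
          rets.foldl (fun rv ret => rv ++ [ret ++ [i]]) retval) []

def addmine (vals : List String) (upper : Int) (lev : Int) : List (List String) :=
  addmineGo vals upper lev (2 * vals.length + 1)

-- ===== PORT B =====
-- vals[i] in Source B raises only outside Pre_; pyGetD is its total form (exact under Pre_)
def addmine_alt (vals : List String) (upper : Int) (lev : Int) : List (List String) :=
  (PySem.List.pyRange (lev + 1) (vals.length : Int) 1).foldl
    (fun acc i =>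
      acc.flatMap (fun t =>
        ((PySem.Str.split? (PySem.List.pyGetD vals i "") " ").getD []).map
          (fun tok => tok :: t)))
    (((PySem.Str.split? (PySem.List.pyGetD vals lev "") " ").getD []).map (fun tok => [tok]))

-- ===== PRECONDITION & SPEC =====
-- Pre_: exactly the inputs where the vals[lev] indexing of both Pythons never raises IndexError
-- (A and B raise on the same inputs: lev out of Python index range for vals).
def Pre_addmine (vals : List String) (upper : Int) (lev : Int) : Prop :=
  PySem.Raise.InRange vals.length lev
instance (vals : List String) (upper : Int) (lev : Int) : Decidable (Pre_addmine vals upper lev) := by unfold Pre_addmine; infer_instance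
def pvWitness_addmine : List String × Int × Int := (["a b", "c"], 0, 0)

def Spec_addmine (vals : List String) (upper : Int) (lev : Int) (out : List (List String)) : Prop := out = addmine_alt vals upper lev
instance (vals : List String) (upper : Int) (lev : Int) (out : List (List String)) : Decidable (Spec_addmine vals upper lev out) := by unfold Spec_addmine; infer_instance

-- ===== CLAIM (what is proved, stated in full; the proofs are below) =====
def Claim_equal_addmine : Prop := ∀ (vals : List String) (upper : Int) (lev : Int), Dom_addmine vals upper lev → Pre_addmine vals upper lev → Spec_addmine vals upper lev (addmine vals upper lev)

-- ===== LEMMAS AND PROOFS =====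

-- the tokens of vals[i] (total form, exact under Pre_)
def toksAt (vals : List String) (i : Int) : List String :=
  (PySem.Str.split? (PySem.List.pyGetD vals i "") " ").getD []

theorem flatMap_singleton_eq_map {α β : Type} (g : α → β) (l : List α) :
    l.flatMap (fun x => [g x]) = l.map g := by
  induction l with
  | nil => rfl
  | cons x xs ih => simp [List.flatMap_cons, ih]

-- reference Cartesian product over the per-level token lists (shallowest level first),
-- tuples deepest-token-first, shallowest level varying slowest — A's arrangement
def tupleProd : List (List String) → List (List String)
  | [] => [[]]
  | c :: rest => c.flatMap (fun i => (tupleProd rest).map (fun r => r ++ [i]))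

theorem foldl_prepend_eq_tupleProd :
    ∀ (ts : List (List String)) (acc : List (List String)),
      ts.foldl (fun acc c => acc.flatMap (fun t => c.map (fun tok => tok :: t))) acc
        = acc.flatMap (fun t => (tupleProd ts).map (fun r => r ++ t)) := by
  intro ts
  induction ts with
  | nil => intro acc; simp [tupleProd]
  | cons c rest ih =>
    intro acc
    simp only [List.foldl_cons, ih, tupleProd]
    simp [List.flatMap_assoc, List.map_flatMap, List.flatMap_map, List.map_map,
      Function.comp_def, List.append_assoc]

-- the fold over indices is the fold over the mapped token lists
theorem foldl_toks (vals : List String) :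
    ∀ (idxs : List Int) (init : List (List String)),
      idxs.foldl (fun acc i => acc.flatMap (fun t => (toksAt vals i).map (fun tok => tok :: t))) init
        = (idxs.map (toksAt vals)).foldl
            (fun acc c => acc.flatMap (fun t => c.map (fun tok => tok :: t))) init := by
  intro idxs
  induction idxs with
  | nil => intro init; rfl
  | cons i idxs ih => intro init; simp only [List.foldl_cons, List.map_cons, ih]

-- B computes the reference product of the levels lev … len-1
theorem alt_eq_tupleProd (vals : List String) (upper : Int) (lev : Int)
    (h : lev < (vals.length : Int)) :
    addmine_alt vals upper lev =
      tupleProd ((PySem.List.pyRange lev (vals.length : Int) 1).map (toksAt vals)) := by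
  rw [PySem.List.pyRange_one_cons h]
  unfold addmine_alt
  simp only [show ∀ i : Int,
      ((PySem.Str.split? (PySem.List.pyGetD vals i "") " ").getD []) = toksAt vals i
    from fun _ => rfl]
  rw [foldl_toks, foldl_prepend_eq_tupleProd]
  simp only [List.map_cons, tupleProd]
  simp [List.flatMap_map]

-- A's recursion computes the same reference product
theorem go_eq_tupleProd (vals : List String) (upper : Int) :
    ∀ (fuel : Nat) (lev : Int), PySem.Raise.InRange vals.length lev →
      (vals.length : Int) - lev ≤ (fuel : Int) →
      addmineGo vals upper lev fuel =
        tupleProd ((PySem.List.pyRange lev (vals.length : Int) 1).map (toksAt vals)) := by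
  intro fuel
  induction fuel with
  | zero =>
    intro lev hin hf
    simp [PySem.Raise.InRange] at hin
    omega
  | succ fuel ih =>
    intro lev hin hf
    have hlt : lev < (vals.length : Int) := by
      simp [PySem.Raise.InRange] at hin; omega
    obtain ⟨s, hs⟩ : ∃ s, PySem.List.pyGet? vals lev = some s := by
      cases hget : PySem.List.pyGet? vals lev with
      | none => exact absurd ((PySem.List.pyGet?_eq_none_iff vals lev).mp hget) (not_not_intro hin)
      | some s => exact ⟨s, rfl⟩
    have htoks : toksAt vals lev = (PySem.Str.split? s " ").getD [] := by
      simp [toksAt, PySem.List.pyGetD, hs]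
    rw [PySem.List.pyRange_one_cons hlt]
    unfold addmineGo
    rw [hs]
    dsimp only
    simp only [List.map_cons, tupleProd, htoks]
    by_cases hbase : lev + 1 = (vals.length : Int)
    · rw [if_pos hbase, PySem.List.pyRange_one_eq_nil (by omega)]
      rw [PySem.List.foldl_append_singleton_eq_map]
      simp [tupleProd, flatMap_singleton_eq_map]
    · rw [if_neg hbase]
      have hrec : addmineGo vals upper (lev + 1) fuel =
          tupleProd ((PySem.List.pyRange (lev + 1) (vals.length : Int) 1).map (toksAt vals)) := by
        apply ih
        · simp [PySem.Raise.InRange] at hin ⊢; omega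
        · push_cast at hf ⊢; omega
      simp only [hrec, PySem.List.foldl_append_singleton_eq_map]
      rw [PySem.List.foldl_append_eq_flatMap]
      rfl

-- ===== VERDICT (by name: the statement is the Claim_ definition above) =====
theorem addmine_spec : Claim_equal_addmine := by
  intro vals upper lev _hdom hpre
  have hlt : lev < (vals.length : Int) := by
    simp [Pre_addmine, PySem.Raise.InRange] at hpre; omega
  unfold Spec_addmine addmine
  rw [go_eq_tupleProd vals upper _ lev hpre (by
    simp [Pre_addmine, PySem.Raise.InRange] at hpre; push_cast; omega)]
  rw [alt_eq_tupleProd vals upper lev hlt]
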